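-- pv_equiv track=rewrite | github.com/galaxyproject/galaxy | tools/filters/join.py | fill_empty_columns
-- ===== SOURCE A (Python) =====
-- def fill_empty_columns( line, split, fill_values ):
--     if not fill_values:
--         return line
--     filled_columns = []
--     for i, field in enumerate( line.split( split ) ):
--         if field or i >= len( fill_values ):
--             filled_columns.append( field )
--         else:
--             filled_columns.append( fill_values[i] )
--     if len( fill_values ) > len( filled_columns ):
--         filled_columns.extend( fill_values[ len( filled_columns ): ] )
--     return split.join( filled_columns )
-- ===== SOURCE B (Python) =====
-- def fill_empty_columns(line, split, fill_values):
--     # recursive decomposition: structural recursion on both lists at once,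
--     # no loop, no indices, no accumulator, no separate tail-extend step
--     if not fill_values:
--         return line
--
--     def merge(fields, fvs):
--         if not fields:
--             return list(fvs)
--         if not fvs:
--             return list(fields)
--         head = fields[0] if fields[0] else fvs[0]
--         return [head] + merge(fields[1:], fvs[1:])
--
--     return split.join(merge(line.split(split), fill_values))
-- ===== Notes on version B (the rewrite author's own statement) =====
-- stated objective: alternative
-- what changed: replaces A's indexed loop with an i >= len(fill_values) test plus a separate trailing extend by a structural recursion on both lists at once whose base cases return the leftover list directly (no loop, no indices, no accumulator)
import Mathlib
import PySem

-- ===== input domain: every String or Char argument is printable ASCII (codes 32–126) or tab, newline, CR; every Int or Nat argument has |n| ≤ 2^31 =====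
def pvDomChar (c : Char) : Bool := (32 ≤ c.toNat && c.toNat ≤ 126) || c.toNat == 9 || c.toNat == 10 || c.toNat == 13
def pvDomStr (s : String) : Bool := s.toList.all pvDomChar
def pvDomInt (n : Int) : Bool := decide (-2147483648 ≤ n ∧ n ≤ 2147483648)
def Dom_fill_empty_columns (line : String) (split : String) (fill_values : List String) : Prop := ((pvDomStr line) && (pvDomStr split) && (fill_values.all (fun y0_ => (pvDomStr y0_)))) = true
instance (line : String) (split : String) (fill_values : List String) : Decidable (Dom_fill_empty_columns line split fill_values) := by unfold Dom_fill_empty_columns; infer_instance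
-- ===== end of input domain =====

-- B replaces A's indexed loop plus separate trailing extend by a structural
-- recursion on both lists at once (objective: alternative decomposition).

-- ===== PORT A =====
def fill_empty_columns (line : String) (split : String) (fill_values : List String) : String :=
  if fill_values = [] then line
  else
    -- line.split(split); 'none' only when split = "", which Pre_ excludes (Python raises ValueError)
    let fields := (PySem.Str.split? line split).getD []
    let filled_columns :=
      (PySem.List.enumerate fields 0).foldl
        (fun acc p =>
          if p.2 ≠ "" ∨ (fill_values.length : Int) ≤ p.1 then acc ++ [p.2]
          else acc ++ [PySem.List.pyGetD fill_values p.1 ""]) []   -- fill_values[i], i in range in this branch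
    let filled_columns :=
      if (fill_values.length : Int) > (filled_columns.length : Int) then
        filled_columns ++ PySem.List.slice fill_values (some (filled_columns.length : Int)) none
      else filled_columns
    PySem.Str.join split filled_columns

-- ===== PORT B =====
-- Source B's merge: recursion on both lists, base cases return the leftover list
def mergeFill : List String → List String → List String
  | [], fvs => fvs
  | fs, [] => fs
  | f :: fs, fv :: fvs => (if f ≠ "" then f else fv) :: mergeFill fs fvs

def fill_empty_columns_alt (line : String) (split : String) (fill_values : List String) : String :=
  if fill_values = [] then line
  else
    let fields := (PySem.Str.split? line split).getD []   -- 'none' only when split = "", excluded by Pre_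
    PySem.Str.join split (mergeFill fields fill_values)

-- ===== PRECONDITION & SPEC =====
-- Pre_ excludes split = "" with non-empty fill_values: there Python's line.split("") raises ValueError.
def Pre_fill_empty_columns (line : String) (split : String) (fill_values : List String) : Prop :=
  fill_values = [] ∨ split ≠ ""
instance (line : String) (split : String) (fill_values : List String) : Decidable (Pre_fill_empty_columns line split fill_values) := by unfold Pre_fill_empty_columns; infer_instance

def pvWitness_fill_empty_columns : String × String × List String :=
  ("a\t\tb", "\t", ["x", "y", "z"])

def Spec_fill_empty_columns (line : String) (split : String) (fill_values : List String) (out : String) : Prop := out = fill_empty_columns_alt line split fill_values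
instance (line : String) (split : String) (fill_values : List String) (out : String) : Decidable (Spec_fill_empty_columns line split fill_values out) := by unfold Spec_fill_empty_columns; infer_instance

-- ===== CLAIM (what is proved, stated in full; the proofs are below) =====
def Claim_equal_fill_empty_columns : Prop := ∀ (line : String) (split : String) (fill_values : List String), Dom_fill_empty_columns line split fill_values → Pre_fill_empty_columns line split fill_values → Spec_fill_empty_columns line split fill_values (fill_empty_columns line split fill_values)

-- ===== LEMMAS AND PROOFS =====

-- A's loop body as a map function
def pvG (fvs : List String) (p : Int × String) : String :=
  if p.2 ≠ "" ∨ (fvs.length : Int) ≤ p.1 then p.2 else PySem.List.pyGetD fvs p.1 ""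

lemma pvG_nil (fs : List String) (s : Int) (hs : 0 ≤ s) :
    (PySem.List.enumerate fs s).map (pvG []) = fs := by
  induction fs generalizing s with
  | nil => simp [PySem.List.enumerate_nil]
  | cons f fs ih =>
    simp only [PySem.List.enumerate_cons, List.map_cons, ih (s+1) (by omega)]
    simp [pvG, hs]

lemma pvG_shift (v : String) (fvs fs : List String) (s : Int) (hs : 0 ≤ s) :
    (PySem.List.enumerate fs (s + 1)).map (pvG (v :: fvs)) =
    (PySem.List.enumerate fs s).map (pvG fvs) := by
  induction fs generalizing s with
  | nil => simp [PySem.List.enumerate_nil]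
  | cons f fs ih =>
    simp only [PySem.List.enumerate_cons, List.map_cons]
    rw [show s + 1 + 1 = (s + 1) + 1 from rfl, ih (s + 1) (by omega)]
    congr 1
    lift s to Nat using hs
    have hg : PySem.List.pyGetD (v :: fvs) ((s : Int) + 1) "" = PySem.List.pyGetD fvs (s : Int) "" := by
      rw [show ((s : Int) + 1) = (((s + 1 : Nat)) : Int) by push_cast; ring,
        PySem.List.pyGetD_natCast, PySem.List.pyGetD_natCast]
      simp
    have hc : (((v :: fvs).length : Int) ≤ (s : Int) + 1) ↔ ((fvs.length : Int) ≤ (s : Int)) := by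
      simp only [List.length_cons]
      omega
    unfold pvG
    simp only [hc, hg]

lemma slice_cons_succ (v : String) (vs : List String) (n : Nat) :
    PySem.List.slice (v :: vs) (some ((n + 1 : Nat) : Int)) none =
    PySem.List.slice vs (some ((n : Nat) : Int)) none := by
  rw [PySem.List.slice_from_natCast, PySem.List.slice_from_natCast]
  simp

lemma mergeFill_main (fs fvs : List String) :
    (if (fvs.length : Int) > ((((PySem.List.enumerate fs 0).map (pvG fvs)).length : Nat) : Int) then
      (PySem.List.enumerate fs 0).map (pvG fvs) ++
        PySem.List.slice fvs (some ((((PySem.List.enumerate fs 0).map (pvG fvs)).length : Nat) : Int)) none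
    else (PySem.List.enumerate fs 0).map (pvG fvs)) = mergeFill fs fvs := by
  induction fs generalizing fvs with
  | nil =>
    simp only [PySem.List.enumerate_nil, List.map_nil, List.length_nil]
    cases fvs with
    | nil => simp [mergeFill]
    | cons v vs =>
      simp [mergeFill]
  | cons f fs ih =>
    have hhead0 : pvG [] (0, f) = f := by
      unfold pvG; simp
    cases fvs with
    | nil =>
      simp only [PySem.List.enumerate_cons, List.map_cons, List.length_nil, Nat.cast_zero,
        hhead0]
      rw [show (0 : Int) + 1 = 1 from rfl, pvG_nil fs 1 (by omega)]
      rw [if_neg (by omega)]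
      rfl
    | cons v vs =>
      have hsh : (PySem.List.enumerate fs (0 + 1)).map (pvG (v :: vs)) =
          (PySem.List.enumerate fs 0).map (pvG vs) := pvG_shift v vs fs 0 le_rfl
      have hhead : pvG (v :: vs) (0, f) = (if f ≠ "" then f else v) := by
        by_cases hf : f = "" <;> simp [pvG, hf, PySem.List.pyGetD_zero_cons]
      simp only [PySem.List.enumerate_cons, List.map_cons, hsh, hhead, List.length_cons]
      rw [show mergeFill (f :: fs) (v :: vs)
            = (if f ≠ "" then f else v) :: mergeFill fs vs from rfl, ← ih vs]
      rw [slice_cons_succ]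
      by_cases h : (vs.length : Int) >
          ((((PySem.List.enumerate fs 0).map (pvG vs)).length : Nat) : Int)
      · rw [if_pos h, if_pos (by push_cast at h ⊢; omega)]
        simp
      · rw [if_neg h, if_neg (by push_cast at h ⊢; omega)]

lemma loop_body_eq (fvs : List String) :
    (fun (acc : List String) (p : Int × String) =>
      if p.2 ≠ "" ∨ (fvs.length : Int) ≤ p.1 then acc ++ [p.2]
      else acc ++ [PySem.List.pyGetD fvs p.1 ""]) =
    fun acc p => acc ++ [pvG fvs p] := by
  funext acc p
  unfold pvG
  split_ifs <;> rfl

-- ===== VERDICT (by name: the statement is the Claim_ definition above) =====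
theorem fill_empty_columns_spec : Claim_equal_fill_empty_columns := by
  intro line split fvs _ _
  unfold Spec_fill_empty_columns fill_empty_columns fill_empty_columns_alt
  by_cases h : fvs = []
  · simp [h]
  · simp only [h, if_false]
    rw [loop_body_eq fvs, PySem.List.foldl_append_singleton_eq_map, List.nil_append]
    rw [mergeFill_main ((PySem.Str.split? line split).getD []) fvs]
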